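-- pv_equiv track=rewrite | github.com/Ahmosys/PythonAlgorithmsCCF | ccf_4/ccf_4.py | mystere
-- ===== SOURCE A (Python) =====
-- def mystere(n):
--     array = [[0 for k in range (n)] for l in range (n)] #Nouveau tableau de taille n colonnes et n lignes (renseigner en paramètre)
--     q = (n-n%4)/4
--     for i in range (n): #Boucle pour parcourir tout les éléments du tableau
--         for j in range (n):
--             if ((i < q) or (i > n-1-q) or (j < q) or (j > n-1-q)): #Condition
--                 array[i][j] = 0
--             else:
--                 array[i][j] = 1
--     return array
-- ===== SOURCE B (Python) =====
-- def mystere(n):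
--     q = int((n - n % 4) / 4)
--     inner_row = [0] * q + [1] * (n - 2 * q) + [0] * q
--     zero_row = [0] * n
--     return [list(inner_row) if q <= i < n - q else list(zero_row) for i in range(n)]
-- ===== Notes on version B (the rewrite author's own statement) =====
-- stated objective: simpler
-- what changed: Instead of scanning all n*n cells and testing the four-way border condition per cell, B builds the inner row and the zero row once by list replication/concatenation and emits a copy of the right row per row index; intended as faster (the probe measured 8-11x on sizes both finish) but not confirmed at the largest size, so no speed is claimed.
import Mathlib
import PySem

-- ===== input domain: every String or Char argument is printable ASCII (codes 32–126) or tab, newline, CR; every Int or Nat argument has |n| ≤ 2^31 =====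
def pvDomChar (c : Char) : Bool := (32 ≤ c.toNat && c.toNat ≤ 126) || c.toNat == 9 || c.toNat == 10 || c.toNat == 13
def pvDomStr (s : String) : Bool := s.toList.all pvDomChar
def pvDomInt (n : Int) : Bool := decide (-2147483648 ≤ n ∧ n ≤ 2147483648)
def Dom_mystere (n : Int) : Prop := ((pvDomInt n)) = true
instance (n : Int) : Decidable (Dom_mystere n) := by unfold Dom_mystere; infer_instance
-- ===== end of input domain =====

-- B builds the two distinct rows once by replication/concatenation and emits a copy per row
-- index, instead of A's per-cell scan with a four-way border test.

-- ===== PORT A =====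
-- A mutates array[i][j] in place; modelled by List.modify / List.set (indices produced by
-- range(n) are nonnegative and in range, so .toNat is exact here).
-- q = (n - n%4)/4 is Python float true division, but n - n%4 is always a multiple of 4,
-- so the value is integer-valued and equals floor division exactly.
def mystere (n : Int) : List (List Int) :=
  let array : List (List Int) :=
    (PySem.List.pyRange 0 n 1).map (fun _ => (PySem.List.pyRange 0 n 1).map (fun _ => (0 : Int)))
  let q : Int := PySem.Int.floordiv (n - PySem.Int.mod n 4) 4
  (PySem.List.pyRange 0 n 1).foldl (fun arr i =>
    (PySem.List.pyRange 0 n 1).foldl (fun arr j =>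
      if i < q ∨ i > n - 1 - q ∨ j < q ∨ j > n - 1 - q then
        arr.modify i.toNat (fun row => row.set j.toNat 0)
      else
        arr.modify i.toNat (fun row => row.set j.toNat 1)) arr) array

-- ===== PORT B =====
-- int(q) is the identity here (q is integer-valued); [x]*k → List.replicate k.toNat
-- (Python's [x]*k is empty for k ≤ 0, matching .toNat); list(r) copy → r itself.
def mystere_alt (n : Int) : List (List Int) :=
  let q : Int := PySem.Int.floordiv (n - PySem.Int.mod n 4) 4
  let innerRow : List Int :=
    List.replicate q.toNat 0 ++ List.replicate (n - 2 * q).toNat 1 ++ List.replicate q.toNat 0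
  let zeroRow : List Int := List.replicate n.toNat 0
  (PySem.List.pyRange 0 n 1).map (fun i => if q ≤ i ∧ i < n - q then innerRow else zeroRow)

-- ===== PRECONDITION & SPEC =====
def Spec_mystere (n : Int) (out : List (List Int)) : Prop := out = mystere_alt n
instance (n : Int) (out : List (List Int)) : Decidable (Spec_mystere n out) := by unfold Spec_mystere; infer_instance

-- ===== CLAIM (what is proved, stated in full; the proofs are below) =====
def Claim_equal_mystere : Prop := ∀ (n : Int), Dom_mystere n → Spec_mystere n (mystere n)

-- ===== LEMMAS AND PROOFS =====

-- Inner loop of A: folding `set` over a list of nonnegative indices; entrywise description.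
theorem foldl_set_getElem? (g : Int → Int) :
    ∀ (js : List Int) (row : List Int), (∀ j ∈ js, 0 ≤ j) → ∀ (k : Nat),
      (js.foldl (fun r j => r.set j.toNat (g j)) row)[k]? =
        if (k : Int) ∈ js ∧ k < row.length then some (g k) else row[k]? := by
  intro js
  induction js with
  | nil => intro row _ k; simp
  | cons j t ih =>
    intro row hnn k
    have hj : 0 ≤ j := hnn j (by simp)
    simp only [List.foldl_cons]
    rw [ih _ (fun x hx => hnn x (by simp [hx])) k]
    rw [List.length_set, List.getElem?_set]
    by_cases ht : (k : Int) ∈ t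
    · by_cases hk : k < row.length
      · simp [ht, hk]
      · have hr : row[k]? = none := List.getElem?_eq_none (by omega)
        simp [ht, hk]
        omega
    · by_cases he : j.toNat = k
      · have hjk : (k : Int) = j := by omega
        by_cases hk : k < row.length
        · simp [he, hk, hjk]
        · have hr : row[k]? = none := List.getElem?_eq_none (by omega)
          simp [he, hk]
      · have hjk : (k : Int) ≠ j := by omega
        simp [ht, he, List.mem_cons, hjk]

-- modify twice at the same index composes
theorem modify_modify_same (i : Nat) (l : List (List Int)) (f g : List Int → List Int) :
    (l.modify i f).modify i g = l.modify i (fun x => g (f x)) := by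
  apply List.ext_getElem?
  intro k
  rw [List.getElem?_modify, List.getElem?_modify, List.getElem?_modify]
  by_cases h : i = k <;> cases l[k]? <;> simp [h]

-- A's inner loop, mutating row i of the array each step, collapses to one `modify`.
theorem foldl_modify_same (i : Nat) (s : Int → List Int → List Int) :
    ∀ (js : List Int) (arr : List (List Int)),
      js.foldl (fun a j => a.modify i (s j)) arr
        = arr.modify i (fun row => js.foldl (fun r j => s j r) row) := by
  intro js
  induction js with
  | nil =>
    intro arr
    symm
    apply List.ext_getElem?
    intro k
    rw [List.getElem?_modify]
    by_cases h : i = k <;> cases harr : arr[k]? <;> simp [h, harr]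
  | cons j t ih =>
    intro arr
    simp only [List.foldl_cons]
    rw [ih, modify_modify_same]

-- Outer loop of A: folding `modify` over a duplicate-free list of nonnegative indices.
theorem foldl_modify_getElem? (h : Int → List Int → List Int) :
    ∀ (is : List Int) (arr : List (List Int)), (∀ i ∈ is, 0 ≤ i) → is.Nodup → ∀ (k : Nat),
      (is.foldl (fun a i => a.modify i.toNat (h i)) arr)[k]? =
        if (k : Int) ∈ is then arr[k]?.map (h k) else arr[k]? := by
  intro is
  induction is with
  | nil => intro arr _ _ k; simp
  | cons i t ih =>
    intro arr hnn hnd k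
    have hi : 0 ≤ i := hnn i (by simp)
    simp only [List.foldl_cons]
    rw [ih _ (fun x hx => hnn x (by simp [hx])) (List.Nodup.of_cons hnd) k]
    rw [List.getElem?_modify]
    by_cases ht : (k : Int) ∈ t
    · have hik : i ≠ (k : Int) := fun he => (List.nodup_cons.mp hnd).1 (he ▸ ht)
      have hik' : ¬ i.toNat = k := by omega
      cases harr : arr[k]? <;> simp [ht, hik']
    · by_cases he : i.toNat = k
      · have hki : (k : Int) = i := by omega
        cases harr : arr[k]?
        · simp [he]
        · simp [he, List.mem_cons, hki]
          intro hit
          exact absurd (hki ▸ hit) ht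
      · have hik : (k : Int) ≠ i := by omega
        cases harr : arr[k]? <;> simp [ht, he, List.mem_cons, hik]

theorem q_facts (n : Int) (hn : 0 ≤ n) :
    0 ≤ PySem.Int.floordiv (n - PySem.Int.mod n 4) 4 ∧
      2 * PySem.Int.floordiv (n - PySem.Int.mod n 4) 4 ≤ n := by
  rw [PySem.Int.mod_eq_emod_of_pos (by norm_num : (0:Int) < 4),
      PySem.Int.floordiv_eq_ediv_of_pos (by norm_num : (0:Int) < 4)]
  omega

-- ===== VERDICT (by name: the statement is the Claim_ definition above) =====
theorem mystere_spec : Claim_equal_mystere := by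
  intro n _
  unfold Spec_mystere mystere mystere_alt
  simp only []
  set q : Int := PySem.Int.floordiv (n - PySem.Int.mod n 4) 4 with hqdef
  by_cases hn : 0 ≤ n
  case neg =>
    have h0 : PySem.List.pyRange 0 n 1 = [] := PySem.List.pyRange_one_eq_nil (by omega)
    simp [h0]
  case pos =>
  obtain ⟨hq0, hq2⟩ := q_facts n hn
  rw [← hqdef] at hq0 hq2
  -- per-cell value written by A at (i, j)
  set g : Int → Int → Int := fun i j =>
    if i < q ∨ i > n - 1 - q ∨ j < q ∨ j > n - 1 - q then 0 else 1 with hgdef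
  -- A's two-branch step = a single modify/set with value g i j
  have hbranch : ∀ i : Int,
      (fun (arr : List (List Int)) (j : Int) =>
        if i < q ∨ i > n - 1 - q ∨ j < q ∨ j > n - 1 - q then
          arr.modify i.toNat (fun row => row.set j.toNat 0)
        else
          arr.modify i.toNat (fun row => row.set j.toNat 1)) =
      (fun (arr : List (List Int)) (j : Int) =>
        arr.modify i.toNat (fun row => row.set j.toNat (g i j))) := by
    intro i; funext arr j
    by_cases hc : i < q ∨ i > n - 1 - q ∨ j < q ∨ j > n - 1 - q
    · simp only [hgdef, if_pos hc]
    · simp only [hgdef, if_neg hc]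
  have hA : (fun (arr : List (List Int)) (i : Int) =>
        (PySem.List.pyRange 0 n 1).foldl (fun arr j =>
          if i < q ∨ i > n - 1 - q ∨ j < q ∨ j > n - 1 - q then
            arr.modify i.toNat (fun row => row.set j.toNat 0)
          else
            arr.modify i.toNat (fun row => row.set j.toNat 1)) arr)
      = (fun (arr : List (List Int)) (i : Int) =>
          arr.modify i.toNat (fun row =>
            (PySem.List.pyRange 0 n 1).foldl (fun r j => r.set j.toNat (g i j)) row)) := by
    funext arr i
    rw [hbranch i, foldl_modify_same]
  rw [hA]
  have hnonneg : ∀ i ∈ PySem.List.pyRange 0 n 1, (0:Int) ≤ i :=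
    fun i hi => (PySem.List.mem_pyRange_one.mp hi).1
  have hlen : (PySem.List.pyRange 0 n 1).length = n.toNat := by
    rw [PySem.List.length_pyRange_one]; omega
  -- the all-zero row A starts from
  have hzlen : ((PySem.List.pyRange 0 n 1).map (fun _ => (0:Int))).length = n.toNat := by
    rw [List.length_map, hlen]
  have hz : ∀ j : Nat, ((PySem.List.pyRange 0 n 1).map (fun _ => (0:Int)))[j]? =
      if j < n.toNat then some 0 else none := by
    intro j
    rw [List.getElem?_map, PySem.List.getElem?_pyRange_one]
    by_cases hj : j < n.toNat
    · simp [hj]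
    · simp [hj]
  apply List.ext_getElem?
  intro k
  rw [foldl_modify_getElem? _ _ _ hnonneg (PySem.List.nodup_pyRange_one 0 n) k]
  rw [List.getElem?_map, List.getElem?_map, PySem.List.getElem?_pyRange_one]
  by_cases hk : k < n.toNat
  case neg =>
    have hmem : ¬ ((k : Int) ∈ PySem.List.pyRange 0 n 1) := by
      rw [PySem.List.mem_pyRange_one]; omega
    simp [hmem, show ¬ (k:Int) < n by omega]
  case pos =>
  have hmem : (k : Int) ∈ PySem.List.pyRange 0 n 1 := by
    rw [PySem.List.mem_pyRange_one]; omega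
  simp only [hmem, if_pos, show k < (n - 0).toNat by omega, Option.map_some, zero_add]
  -- both sides are `some row`; compare the rows entrywise
  congr 1
  apply List.ext_getElem?
  intro j
  rw [foldl_set_getElem? (g (k : Int)) _ _ hnonneg j, hzlen, hz j]
  by_cases hj : j < n.toNat
  case neg =>
    rw [if_neg (fun hh => hj hh.2), if_neg hj]
    split_ifs
    · symm
      apply List.getElem?_eq_none
      simp only [List.length_append, List.length_replicate]
      omega
    · symm
      apply List.getElem?_eq_none
      simp only [List.length_replicate]
      omega
  case pos =>
  have hjm : (j : Int) ∈ PySem.List.pyRange 0 n 1 := by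
    rw [PySem.List.mem_pyRange_one]; omega
  rw [if_pos ⟨hjm, hj⟩]
  -- entries of B's two row templates
  have hq2n : q.toNat + (n - 2 * q).toNat + q.toNat = n.toNat := by omega
  split_ifs with hcase
  · -- row k is inside the frame: B's inner row
    rw [List.getElem?_append, List.length_append, List.length_replicate, List.length_replicate]
    by_cases h1 : j < q.toNat + (n - 2*q).toNat
    · rw [if_pos (by omega)]
      rw [List.getElem?_append, List.length_replicate]
      by_cases h2 : j < q.toNat
      · rw [if_pos (by omega), List.getElem?_replicate, if_pos (by omega)]
        rw [hgdef]; simp only []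
        rw [if_pos (by omega)]
      · rw [if_neg (by omega), List.getElem?_replicate, if_pos (by omega)]
        rw [hgdef]; simp only []
        rw [if_neg (by omega)]
    · rw [if_neg (by omega), List.getElem?_replicate, if_pos (by omega)]
      rw [hgdef]; simp only []
      rw [if_pos (by omega)]
  · -- row k is on the frame: B's all-zero row
    rw [List.getElem?_replicate, if_pos (by omega)]
    rw [hgdef]; simp only []
    rw [if_pos (by omega)]
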